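-- pv_equiv track=rewrite | github.com/hnrm110901-cell/zhilian-os | apps/api-gateway/src/services/shift_fairness_service.py | find_consecutive_worst_employees
-- ===== SOURCE A (Python) =====
-- from collections import defaultdict
-- from typing import Any, Dict, List, Optional
--
-- def find_consecutive_worst_employees(
--     weekly_unfavorable_counts: List[Dict[str, int]],
--     min_weeks: int = 3,
-- ) -> List[str]:
--     """识别连续 N 周处于最差班次分配顶部的员工。"""
--     if min_weeks <= 1:
--         min_weeks = 1
--
--     streaks: Dict[str, int] = defaultdict(int)
--     flagged = set()
--
--     for week_map in weekly_unfavorable_counts: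
--         if not week_map:
--             continue
--
--         max_count = max(week_map.values())
--         winners = {employee_id for employee_id, count in week_map.items() if count == max_count and count > 0}
--
--         for employee_id in list(streaks.keys()):
--             if employee_id not in winners:
--                 streaks[employee_id] = 0
--
--         for employee_id in winners:
--             streaks[employee_id] += 1
--             if streaks[employee_id] >= min_weeks:
--                 flagged.add(employee_id)
--
--     return sorted(flagged)
-- ===== SOURCE B (Python) =====
-- def find_consecutive_worst_employees(weekly_unfavorable_counts, min_weeks=3):
--     """One pass over entries: per-employee (last_winning_week, streak); no weekly reset scan over all tracked employees."""
--     if min_weeks <= 1: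
--         min_weeks = 1
--     last = {}  # employee -> (index of last non-empty week won, streak length)
--     flagged = set()
--     t = 0
--     for week_map in weekly_unfavorable_counts:
--         if not week_map:
--             continue
--         max_count = max(week_map.values())
--         if max_count > 0:
--             for employee_id, count in week_map.items():
--                 if count == max_count:
--                     prev = last.get(employee_id)
--                     streak = prev[1] + 1 if prev is not None and prev[0] == t - 1 else 1
--                     last[employee_id] = (t, streak)
--                     if streak >= min_weeks:
--                         flagged.add(employee_id)
--         t += 1
--     return sorted(flagged)
-- ===== Notes on version B (the rewrite author's own statement) =====
-- stated objective: faster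
-- what changed: Instead of rescanning and zeroing every tracked employee's streak each week, B keeps one (last-winning-week, streak) record per employee, updated only at that week's winners, so each week costs only its own entries.
import Mathlib
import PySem

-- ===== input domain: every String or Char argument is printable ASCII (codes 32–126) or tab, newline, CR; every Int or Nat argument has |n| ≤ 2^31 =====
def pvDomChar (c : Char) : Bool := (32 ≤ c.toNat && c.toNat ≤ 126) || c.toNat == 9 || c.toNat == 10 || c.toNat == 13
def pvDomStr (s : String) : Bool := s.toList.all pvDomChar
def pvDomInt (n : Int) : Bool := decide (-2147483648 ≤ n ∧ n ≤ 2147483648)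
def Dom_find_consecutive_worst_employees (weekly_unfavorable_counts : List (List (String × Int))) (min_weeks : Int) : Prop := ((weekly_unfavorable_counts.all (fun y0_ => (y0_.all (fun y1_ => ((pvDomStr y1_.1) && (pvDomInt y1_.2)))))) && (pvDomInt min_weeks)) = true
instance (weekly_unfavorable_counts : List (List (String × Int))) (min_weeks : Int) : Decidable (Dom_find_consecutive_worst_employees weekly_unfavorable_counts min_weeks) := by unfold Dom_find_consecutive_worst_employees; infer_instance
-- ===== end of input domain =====

-- B replaces A's per-week reset scan over all tracked employees by a per-employee
-- (last-winning-week, streak) record updated only at that week's winners (objective: faster).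

-- ===== PORT A =====
-- loop body of A's 'for week_map in weekly_unfavorable_counts' (state: streaks dict, flagged set)
def pvStepA (mw : Int) (st : PySem.Dict String Int × PySem.Set String)
    (week_list : List (String × Int)) : PySem.Dict String Int × PySem.Set String :=
  let week_map := PySem.Dict.ofList week_list
  if week_map.items = [] then st
  else
    match PySem.List.max? week_map.values (fun x => x) with
    | none => st  -- unreachable: week_map is nonempty
    | some max_count =>
      let winners : PySem.Set String :=
        PySem.Set.ofList ((week_map.items.filter
          (fun p => decide (p.2 = max_count) && decide (0 < p.2))).map Prod.fst)
      -- for employee_id in list(streaks.keys()): if not winner: streaks[employee_id] = 0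
      let streaks0 := st.1.keys.foldl
        (fun d k => if winners.contains k then d else d.insert k 0) st.1
      -- for employee_id in winners: streaks[employee_id] += 1; flag if >= min_weeks
      winners.foldl
        (fun (q : PySem.Dict String Int × PySem.Set String) e =>
          (q.1.modify e 0 (· + 1),
           if mw ≤ (q.1.modify e 0 (· + 1)).getD e 0 then q.2.add e else q.2))
        (streaks0, st.2)

def find_consecutive_worst_employees (weekly_unfavorable_counts : List (List (String × Int))) (min_weeks : Int) : List String :=
  let mw := if min_weeks ≤ 1 then 1 else min_weeks
  let fin := weekly_unfavorable_counts.foldl (pvStepA mw) (PySem.Dict.empty, PySem.Set.empty)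
  PySem.List.sorted fin.2 (fun x => x) false

-- ===== PORT B =====
-- loop body of B's week loop (state: last dict, flagged set, non-empty-week counter t)
def pvStepB (mw : Int) (st : PySem.Dict String (Int × Int) × PySem.Set String × Int)
    (week_list : List (String × Int)) : PySem.Dict String (Int × Int) × PySem.Set String × Int :=
  let week_map := PySem.Dict.ofList week_list
  if week_map.items = [] then st
  else
    match PySem.List.max? week_map.values (fun x => x) with
    | none => st  -- unreachable: week_map is nonempty
    | some max_count =>
      if 0 < max_count then
        let lf := week_map.items.foldl
          (fun (p : PySem.Dict String (Int × Int) × PySem.Set String) kv =>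
            if kv.2 = max_count then
              (p.1.insert kv.1 (st.2.2,
                 match p.1.get? kv.1 with
                 | some prev => if prev.1 = st.2.2 - 1 then prev.2 + 1 else 1
                 | none => 1),
               if mw ≤ (match p.1.get? kv.1 with
                        | some prev => if prev.1 = st.2.2 - 1 then prev.2 + 1 else 1
                        | none => 1) then p.2.add kv.1 else p.2)
            else p)
          (st.1, st.2.1)
        (lf.1, lf.2, st.2.2 + 1)
      else (st.1, st.2.1, st.2.2 + 1)

def find_consecutive_worst_employees_alt (weekly_unfavorable_counts : List (List (String × Int))) (min_weeks : Int) : List String :=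
  let mw := if min_weeks ≤ 1 then 1 else min_weeks
  let fin := weekly_unfavorable_counts.foldl (pvStepB mw) (PySem.Dict.empty, PySem.Set.empty, (0 : Int))
  PySem.List.sorted fin.2.1 (fun x => x) false

-- ===== PRECONDITION & SPEC =====
def Spec_find_consecutive_worst_employees (weekly_unfavorable_counts : List (List (String × Int))) (min_weeks : Int) (out : List String) : Prop := out = find_consecutive_worst_employees_alt weekly_unfavorable_counts min_weeks
instance (weekly_unfavorable_counts : List (List (String × Int))) (min_weeks : Int) (out : List String) : Decidable (Spec_find_consecutive_worst_employees weekly_unfavorable_counts min_weeks out) := by unfold Spec_find_consecutive_worst_employees; infer_instance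

-- ===== CLAIM (what is proved, stated in full; the proofs are below) =====
def Claim_equal_find_consecutive_worst_employees : Prop := ∀ (weekly_unfavorable_counts : List (List (String × Int))) (min_weeks : Int), Dom_find_consecutive_worst_employees weekly_unfavorable_counts min_weeks → Spec_find_consecutive_worst_employees weekly_unfavorable_counts min_weeks (find_consecutive_worst_employees weekly_unfavorable_counts min_weeks)

-- ===== LEMMAS AND PROOFS =====

-- A's current streak of employee e as recoverable from B's state (last dict + week counter t)
def pvCur (dB : PySem.Dict String (Int × Int)) (t : Int) (e : String) : Int :=
  match dB.get? e with
  | some p => if p.1 = t - 1 then p.2 else 0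
  | none => 0

-- the simulation relation between A's and B's loop states
def pvInv (a : PySem.Dict String Int × PySem.Set String)
    (b : PySem.Dict String (Int × Int) × PySem.Set String × Int) : Prop :=
  a.2 = b.2.1 ∧ (∀ e, a.1.getD e 0 = pvCur b.1 b.2.2 e) ∧
    (∀ e p, b.1.get? e = some p → p.1 < b.2.2)

-- B's streak expression is the previous current streak plus one
theorem pvStreak_eq (dB : PySem.Dict String (Int × Int)) (t : Int) (k : String) :
    (match dB.get? k with
     | some prev => if prev.1 = t - 1 then prev.2 + 1 else 1
     | none => 1) = pvCur dB t k + 1 := by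
  unfold pvCur
  cases dB.get? k with
  | none => simp
  | some p => by_cases h : p.1 = t - 1 <;> simp [h]

-- A's reset loop: getD after zeroing every listed non-winner
theorem pvReset_getD (W : PySem.Set String) (L : List String)
    (d : PySem.Dict String Int) (e : String) :
    (L.foldl (fun d k => if W.contains k then d else d.insert k 0) d).getD e 0
      = if e ∈ L ∧ W.contains e = false then 0 else d.getD e 0 := by
  induction L generalizing d with
  | nil => simp
  | cons k L ih =>
    simp only [List.foldl_cons]
    by_cases hk : W.contains k = true
    · rw [if_pos hk, ih]
      by_cases hce : W.contains e = true
      · simp [(PySem.Set.contains_iff W e).mp hce]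
      · have hem : e ∉ W := fun h => hce ((PySem.Set.contains_iff W _).mpr h)
        have hek : e ≠ k := by rintro rfl; exact hem ((PySem.Set.contains_iff W _).mp hk)
        simp [hek]
    · rw [if_neg hk, ih, PySem.Dict.getD_insert]
      have hkm : k ∉ W := fun h => hk ((PySem.Set.contains_iff W _).mpr h)
      by_cases hek : e = k
      · subst hek; simp [hkm]
      · simp [hek]

-- A's winners loop, flagged component
theorem pvAFold_snd (mw : Int) (w : List String) (hnd : w.Nodup)
    (d : PySem.Dict String Int) (f : PySem.Set String) :
    (w.foldl (fun (q : PySem.Dict String Int × PySem.Set String) e =>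
        (q.1.modify e 0 (· + 1),
         if mw ≤ (q.1.modify e 0 (· + 1)).getD e 0 then q.2.add e else q.2)) (d, f)).2
      = w.foldl (fun f e => if mw ≤ d.getD e 0 + 1 then f.add e else f) f := by
  induction w generalizing d f with
  | nil => rfl
  | cons k w ih =>
    rcases List.nodup_cons.mp hnd with ⟨hk, hw⟩
    simp only [List.foldl_cons]
    rw [ih hw]
    rw [PySem.Dict.getD_modify_self]
    apply PySem.List.foldl_congr_mem
    intro acc x hx
    have hxk : x ≠ k := by rintro rfl; exact hk hx
    rw [PySem.Dict.getD_modify, if_neg hxk]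

-- A's winners loop, streaks component
theorem pvAFold_getD (mw : Int) (w : List String) (hnd : w.Nodup)
    (d : PySem.Dict String Int) (f : PySem.Set String) (e : String) :
    (w.foldl (fun (q : PySem.Dict String Int × PySem.Set String) e =>
        (q.1.modify e 0 (· + 1),
         if mw ≤ (q.1.modify e 0 (· + 1)).getD e 0 then q.2.add e else q.2)) (d, f)).1.getD e 0
      = if e ∈ w then d.getD e 0 + 1 else d.getD e 0 := by
  induction w generalizing d f with
  | nil => simp
  | cons k w ih =>
    rcases List.nodup_cons.mp hnd with ⟨hk, hw⟩
    simp only [List.foldl_cons]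
    rw [ih hw]
    rw [PySem.Dict.getD_modify]
    by_cases hek : e = k
    · subst hek; simp [hk]
    · by_cases he : e ∈ w <;> simp [he, hek]

-- B's winners loop, flagged component
theorem pvBFold_snd (mw t : Int) (ws : List (String × Int))
    (hnd : (ws.map Prod.fst).Nodup)
    (dB : PySem.Dict String (Int × Int)) (f : PySem.Set String) :
    (ws.foldl (fun (p : PySem.Dict String (Int × Int) × PySem.Set String) kv =>
        (p.1.insert kv.1 (t,
           match p.1.get? kv.1 with
           | some prev => if prev.1 = t - 1 then prev.2 + 1 else 1
           | none => 1),
         if mw ≤ (match p.1.get? kv.1 with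
                  | some prev => if prev.1 = t - 1 then prev.2 + 1 else 1
                  | none => 1) then p.2.add kv.1 else p.2)) (dB, f)).2
      = ws.foldl (fun f kv => if mw ≤ pvCur dB t kv.1 + 1 then f.add kv.1 else f) f := by
  induction ws generalizing dB f with
  | nil => rfl
  | cons kv ws ih =>
    simp only [List.map_cons] at hnd
    rcases List.nodup_cons.mp hnd with ⟨hk, hw⟩
    simp only [List.foldl_cons]
    rw [ih hw]
    rw [pvStreak_eq]
    apply PySem.List.foldl_congr_mem
    intro acc x hx
    have hne : x.1 ≠ kv.1 := by
      intro hxy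
      exact hk (by rw [← hxy]; exact List.mem_map_of_mem hx)
    have hcur : pvCur (dB.insert kv.1 (t, pvCur dB t kv.1 + 1)) t x.1 = pvCur dB t x.1 := by
      unfold pvCur
      rw [PySem.Dict.get?_insert_of_ne _ _ hne]
    rw [hcur]

-- B's winners loop, last-record component
theorem pvBFold_get? (mw t : Int) (ws : List (String × Int))
    (hnd : (ws.map Prod.fst).Nodup)
    (dB : PySem.Dict String (Int × Int)) (f : PySem.Set String) (e : String) :
    (ws.foldl (fun (p : PySem.Dict String (Int × Int) × PySem.Set String) kv =>
        (p.1.insert kv.1 (t,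
           match p.1.get? kv.1 with
           | some prev => if prev.1 = t - 1 then prev.2 + 1 else 1
           | none => 1),
         if mw ≤ (match p.1.get? kv.1 with
                  | some prev => if prev.1 = t - 1 then prev.2 + 1 else 1
                  | none => 1) then p.2.add kv.1 else p.2)) (dB, f)).1.get? e
      = if e ∈ ws.map Prod.fst then some (t, pvCur dB t e + 1) else dB.get? e := by
  induction ws generalizing dB f with
  | nil => simp
  | cons kv ws ih =>
    simp only [List.map_cons] at hnd ⊢
    rcases List.nodup_cons.mp hnd with ⟨hk, hw⟩
    simp only [List.foldl_cons]
    rw [ih hw]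
    rw [pvStreak_eq]
    by_cases hek : e ∈ ws.map Prod.fst
    · have hne : e ≠ kv.1 := by rintro rfl; exact hk hek
      have hcur : pvCur (dB.insert kv.1 (t, pvCur dB t kv.1 + 1)) t e = pvCur dB t e := by
        unfold pvCur; rw [PySem.Dict.get?_insert_of_ne _ _ hne]
      simp only [hek, if_true, List.mem_cons, or_true, hcur]
    · by_cases hekv : e = kv.1
      · subst hekv
        simp [hek, PySem.Dict.get?_insert_self]
      · simp [hekv, hek, PySem.Dict.get?_insert_of_ne _ _ hekv]

-- not-tracked employees have streak 0 on A's side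
theorem pvGetD_zero_of_not_mem_keys (d : PySem.Dict String Int) (e : String)
    (he : e ∉ d.keys) : d.getD e 0 = 0 := by
  apply PySem.Dict.getD_of_not_contains
  by_contra hc
  exact he ((PySem.Dict.contains_iff_mem_keys d e).mp (by simpa using hc))

theorem pvStep_inv (mw : Int) (a : PySem.Dict String Int × PySem.Set String)
    (b : PySem.Dict String (Int × Int) × PySem.Set String × Int)
    (h : pvInv a b) (wl : List (String × Int)) :
    pvInv (pvStepA mw a wl) (pvStepB mw b wl) := by
  obtain ⟨hflag, hR, hlt⟩ := h
  unfold pvStepA pvStepB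
  by_cases hemp : (PySem.Dict.ofList wl).items = []
  · simp only [hemp]
    exact ⟨hflag, hR, hlt⟩
  · simp only [if_neg hemp]
    cases hmax : PySem.List.max? (PySem.Dict.ofList wl).values (fun x => x) with
    | none => exact ⟨hflag, hR, hlt⟩
    | some mx =>
      dsimp only
      by_cases hpos : 0 < mx
      · -- some employee tops the week: both sides process the winners
        have hfil : (PySem.Dict.ofList wl).items.filter
            (fun p => decide (p.2 = mx) && decide (0 < p.2))
            = (PySem.Dict.ofList wl).items.filter (fun p => decide (p.2 = mx)) := by
          apply List.filter_congr
          intro p _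
          by_cases hp : p.2 = mx
          · simp [hp, hpos]
          · simp [hp]
        have hndk : ((PySem.Dict.ofList wl).items.map Prod.fst).Nodup := by
          have hh := PySem.Dict.nodup_keys_ofList wl
          simpa [PySem.Dict.keys] using hh
        have hnd : ((((PySem.Dict.ofList wl).items.filter
            (fun p => decide (p.2 = mx))).map Prod.fst)).Nodup :=
          List.Nodup.sublist (List.Sublist.map Prod.fst List.filter_sublist) hndk
        have hofl : PySem.Set.ofList (((PySem.Dict.ofList wl).items.filter
              (fun p => decide (p.2 = mx))).map Prod.fst)
            = ((PySem.Dict.ofList wl).items.filter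
              (fun p => decide (p.2 = mx))).map Prod.fst :=
          PySem.Set.ofList_eq_self_of_nodup _ hnd
        have hs0 : ∀ e, (a.1.keys.foldl
            (fun d k => if PySem.Set.contains (((PySem.Dict.ofList wl).items.filter
                (fun p => decide (p.2 = mx))).map Prod.fst) k
              then d else d.insert k 0) a.1).getD e 0
            = if e ∈ ((PySem.Dict.ofList wl).items.filter
                (fun p => decide (p.2 = mx))).map Prod.fst then a.1.getD e 0 else 0 := by
          intro e
          rw [pvReset_getD]
          by_cases hcw : e ∈ ((PySem.Dict.ofList wl).items.filter
              (fun p => decide (p.2 = mx))).map Prod.fst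
          · have hct : PySem.Set.contains (((PySem.Dict.ofList wl).items.filter
                (fun p => decide (p.2 = mx))).map Prod.fst) e
                = true := (PySem.Set.contains_iff _ _).mpr hcw
            simp [hcw]
          · have hcf : PySem.Set.contains (((PySem.Dict.ofList wl).items.filter
                (fun p => decide (p.2 = mx))).map Prod.fst) e
                = false := by
              rw [Bool.eq_false_iff]
              intro hc
              exact hcw ((PySem.Set.contains_iff _ _).mp hc)
            by_cases hkk : e ∈ a.1.keys
            · simp [hkk, hcw]
            · simp [hkk, hcw, pvGetD_zero_of_not_mem_keys a.1 e hkk]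
        have hBfold : (PySem.Dict.ofList wl).items.foldl
            (fun (p : PySem.Dict String (Int × Int) × PySem.Set String) kv =>
              if kv.2 = mx then
                (p.1.insert kv.1 (b.2.2,
                   match p.1.get? kv.1 with
                   | some prev => if prev.1 = b.2.2 - 1 then prev.2 + 1 else 1
                   | none => 1),
                 if mw ≤ (match p.1.get? kv.1 with
                          | some prev => if prev.1 = b.2.2 - 1 then prev.2 + 1 else 1
                          | none => 1) then p.2.add kv.1 else p.2)
              else p) (b.1, b.2.1)
            = ((PySem.Dict.ofList wl).items.filter (fun p => decide (p.2 = mx))).foldl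
            (fun (p : PySem.Dict String (Int × Int) × PySem.Set String) kv =>
              (p.1.insert kv.1 (b.2.2,
                 match p.1.get? kv.1 with
                 | some prev => if prev.1 = b.2.2 - 1 then prev.2 + 1 else 1
                 | none => 1),
               if mw ≤ (match p.1.get? kv.1 with
                        | some prev => if prev.1 = b.2.2 - 1 then prev.2 + 1 else 1
                        | none => 1) then p.2.add kv.1 else p.2)) (b.1, b.2.1) := by
          rw [List.foldl_filter]
          apply PySem.List.foldl_congr_mem
          intro acc x _
          by_cases hx : x.2 = mx <;> simp [hx]
        rw [if_pos hpos, hfil, hofl, hBfold]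
        unfold pvInv
        refine ⟨?_, ?_, ?_⟩
        · -- flagged components agree
          dsimp only
          rw [pvAFold_snd mw _ hnd _ a.2, pvBFold_snd mw b.2.2 _ hnd b.1 b.2.1, hflag,
            List.foldl_map]
          apply PySem.List.foldl_congr_mem
          intro acc x hx
          rw [hs0 x.1, if_pos (List.mem_map_of_mem hx), hR x.1]
        · -- streak relation at week t+1
          intro e
          dsimp only
          rw [pvAFold_getD mw _ hnd _ a.2 e]
          unfold pvCur
          rw [pvBFold_get? mw b.2.2 _ hnd b.1 b.2.1 e]
          by_cases hew : e ∈ ((PySem.Dict.ofList wl).items.filter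
              (fun p => decide (p.2 = mx))).map Prod.fst
          · rw [if_pos hew, if_pos hew, hs0 e, if_pos hew, hR e]
            have hteq : b.2.2 = b.2.2 + 1 - 1 := by omega
            simp [← hteq]
          · rw [if_neg hew, if_neg hew, hs0 e, if_neg hew]
            cases hq : b.1.get? e with
            | none => simp
            | some p =>
              have hple := hlt e p hq
              have hne : ¬ p.1 = b.2.2 + 1 - 1 := by omega
              dsimp only
              rw [if_neg hne]
        · -- timestamps stay below the new week counter
          intro e p hp
          dsimp only at hp ⊢
          rw [pvBFold_get? mw b.2.2 _ hnd b.1 b.2.1 e] at hp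
          by_cases hew : e ∈ ((PySem.Dict.ofList wl).items.filter
              (fun p => decide (p.2 = mx))).map Prod.fst
          · rw [if_pos hew] at hp
            cases hp
            omega
          · rw [if_neg hew] at hp
            have hple := hlt e p hp
            omega
      · -- no positive maximum: A zeroes every streak, B only advances the counter
        have hfil : (PySem.Dict.ofList wl).items.filter
            (fun p => decide (p.2 = mx) && decide (0 < p.2)) = [] := by
          rw [List.filter_eq_nil_iff]
          intro p _
          simp only [Bool.and_eq_true, decide_eq_true_eq, not_and]
          intro h1 h2
          exact hpos (h1 ▸ h2)
        rw [if_neg hpos, hfil]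
        simp only [List.map_nil,
          show PySem.Set.ofList ([] : List String) = ([] : List String) from rfl,
          List.foldl_nil]
        unfold pvInv
        refine ⟨hflag, ?_, ?_⟩
        · intro e
          dsimp only
          rw [pvReset_getD]
          have hrhs : pvCur b.1 (b.2.2 + 1) e = 0 := by
            unfold pvCur
            cases hq : b.1.get? e with
            | none => simp
            | some p =>
              have hple := hlt e p hq
              have hne : ¬ p.1 = b.2.2 + 1 - 1 := by omega
              dsimp only
              rw [if_neg hne]
          rw [hrhs]
          have hcf : PySem.Set.contains ([] : List String) e = false := rfl
          by_cases hkk : e ∈ a.1.keys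
          · simp [hkk]
          · simp [hkk, pvGetD_zero_of_not_mem_keys a.1 e hkk]
        · intro e p hp
          dsimp only at hp
          have hple := hlt e p hp
          show p.1 < b.2.2 + 1
          omega

theorem pvFold_inv (mw : Int) (wk : List (List (String × Int)))
    (a : PySem.Dict String Int × PySem.Set String)
    (b : PySem.Dict String (Int × Int) × PySem.Set String × Int)
    (h : pvInv a b) :
    pvInv (wk.foldl (pvStepA mw) a) (wk.foldl (pvStepB mw) b) := by
  induction wk generalizing a b with
  | nil => exact h
  | cons wl tl ih => exact ih _ _ (pvStep_inv mw a b h wl)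

-- ===== VERDICT (by name: the statement is the Claim_ definition above) =====
theorem find_consecutive_worst_employees_spec : Claim_equal_find_consecutive_worst_employees := by
  intro wk mws _
  unfold Spec_find_consecutive_worst_employees
  unfold find_consecutive_worst_employees find_consecutive_worst_employees_alt
  have h := pvFold_inv (if mws ≤ 1 then 1 else mws) wk
    (PySem.Dict.empty, PySem.Set.empty) (PySem.Dict.empty, PySem.Set.empty, (0 : Int))
    ⟨rfl, fun e => rfl, fun e p hp => by simp [PySem.Dict.get?_empty] at hp⟩
  simp only [h.1]
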